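-- pv_equiv track=rewrite | github.com/sirius-koo/Baekjoon_study | 프로그래머스/2/86971. 전력망을 둘로 나누기/전력망을 둘로 나누기.py | dfs
-- ===== SOURCE A (Python) =====
-- def dfs(start_node, adj_list, n):
--     visited = set()
--     stack = [start_node]
--
--     while stack:
--         current = stack.pop()
--         if current not in visited:
--             visited.add(current)
--
--             for destination in adj_list[current]:
--                 if destination not in visited:
--                     stack.append(destination)
--     return abs(len(visited) * 2 - n)
-- ===== SOURCE B (Python) =====
-- def dfs(start_node, adj_list, n):
--     # BFS over frontier levels instead of an explicit DFS stack:
--     # nodes are marked visited when discovered, so no node enters a frontier twice.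
--     visited = {start_node}
--     frontier = [start_node]
--     while frontier:
--         nxt = []
--         for v in frontier:
--             for d in adj_list[v]:
--                 if d not in visited:
--                     visited.add(d)
--                     nxt.append(d)
--         frontier = nxt
--     return abs(len(visited) * 2 - n)
-- ===== Notes on version B (the rewrite author's own statement) =====
-- stated objective: alternative
-- what changed: Replaces the LIFO-stack DFS that marks nodes only when popped (so the same node can sit on the stack many times) with level-by-level BFS that marks a node the moment it is discovered, so each node enters a frontier at most once; only the size of the reachable set matters, so the traversal-order change preserves the result.
import Mathlib
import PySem

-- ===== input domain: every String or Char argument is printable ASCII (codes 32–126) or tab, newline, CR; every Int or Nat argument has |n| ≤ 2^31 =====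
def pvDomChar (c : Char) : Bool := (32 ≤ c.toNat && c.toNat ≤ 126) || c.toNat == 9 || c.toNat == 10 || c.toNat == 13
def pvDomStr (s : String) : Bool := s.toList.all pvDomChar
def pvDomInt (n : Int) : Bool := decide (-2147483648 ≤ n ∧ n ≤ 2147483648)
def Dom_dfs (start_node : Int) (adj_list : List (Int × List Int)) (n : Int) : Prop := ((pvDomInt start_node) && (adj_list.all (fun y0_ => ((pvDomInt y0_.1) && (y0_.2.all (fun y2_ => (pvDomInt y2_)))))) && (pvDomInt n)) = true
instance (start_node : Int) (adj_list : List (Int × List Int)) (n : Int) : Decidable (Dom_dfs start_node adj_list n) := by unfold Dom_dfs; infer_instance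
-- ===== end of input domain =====

-- B replaces A's LIFO-stack DFS (mark on pop) by level-order BFS (mark on discovery);
-- only the size of the visited set is returned, so the traversal-order change is invisible.


-- adj_list[c] as a total function (first matching key; [] where Python would raise KeyError — Pre_ excludes that)
def pvNb (adj : List (Int × List Int)) (c : Int) : List Int := (PySem.Dict.mk adj).getD c []

-- the set of nodes reachable from `start`, as an iterated neighbour expansion
-- (used only by Pre_dfs; enough rounds are taken to reach the fixpoint, proved in pvIterN_fix)
def pvExpand (adj : List (Int × List Int)) (s : PySem.Set Int) : PySem.Set Int :=
  s.foldl (fun t x => PySem.Set.update t (pvNb adj x)) s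

def pvClosure (adj : List (Int × List Int)) (start : Int) : PySem.Set Int :=
  (List.range (1 + (adj.map (fun p => p.2.length)).sum)).foldl
    (fun s _ => pvExpand adj s) (PySem.Set.add PySem.Set.empty start)

-- ===== PORT A =====
-- A's while-loop: pop from the stack top, mark, push unvisited neighbours.
-- The Nat fuel is only a termination guard; pvFuelA is proved sufficient below (lemma
-- pvA_main), so the fuel-0 branch is never taken from the initial call.  The `none`
-- branch is Python's KeyError (excluded by Pre_dfs).
def pvFuelA (adj : List (Int × List Int)) : Nat :=
  2 + ((adj.map Prod.fst).map (fun k => (pvNb adj k).length)).sum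

def dfsLoop (adj : List (Int × List Int)) : Nat → PySem.Set Int → List Int → PySem.Set Int
  | 0, visited, _ => visited
  | _ + 1, visited, [] => visited
  | fuel + 1, visited, current :: rest =>
    if PySem.Set.contains visited current then
      dfsLoop adj fuel visited rest
    else
      let visited' := PySem.Set.add visited current
      match (PySem.Dict.mk adj).get? current with
      | none => visited'   -- Python: KeyError
      | some ds =>
        dfsLoop adj fuel visited'
          (ds.foldl (fun st d => if PySem.Set.contains visited' d then st else d :: st) rest)

def dfs (start_node : Int) (adj_list : List (Int × List Int)) (n : Int) : Int :=
  let visited := dfsLoop adj_list (pvFuelA adj_list) PySem.Set.empty [start_node]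
  |(visited.length : Int) * 2 - n|

-- ===== PORT B =====
-- B's BFS: one round expands the whole frontier; a node is added to visited (and to the
-- next frontier) the moment it is discovered.  Fuel counts rounds (proved sufficient in
-- pvB_main/pvB_char).  The `none` branch is Python's KeyError (excluded by Pre_dfs).
def pvFuelB (adj : List (Int × List Int)) : Nat :=
  2 + (adj.map (fun p => p.2.length)).sum

def bfsRound (adj : List (Int × List Int)) (frontier : List Int)
    (acc : PySem.Set Int × List Int) : PySem.Set Int × List Int :=
  frontier.foldl (fun acc v =>
    match (PySem.Dict.mk adj).get? v with
    | none => acc   -- Python: KeyError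
    | some ds =>
      ds.foldl (fun acc d =>
        if PySem.Set.contains acc.1 d then acc
        else (PySem.Set.add acc.1 d, acc.2 ++ [d])) acc) acc

def bfsLoop (adj : List (Int × List Int)) : Nat → PySem.Set Int → List Int → PySem.Set Int
  | 0, visited, _ => visited
  | fuel + 1, visited, frontier =>
    if frontier.isEmpty then visited
    else
      let r := bfsRound adj frontier (visited, [])
      bfsLoop adj fuel r.1 r.2

def dfs_alt (start_node : Int) (adj_list : List (Int × List Int)) (n : Int) : Int :=
  let visited := bfsLoop adj_list (pvFuelB adj_list)
    (PySem.Set.add PySem.Set.empty start_node) [start_node]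
  |(visited.length : Int) * 2 - n|

-- ===== PRECONDITION & SPEC =====
-- Pre_dfs: every node reachable from start_node (the closure of {start_node} under the
-- adjacency relation) is a key of the dict — exactly the inputs on which the Python A
-- returns instead of raising KeyError.
def Pre_dfs (start_node : Int) (adj_list : List (Int × List Int)) (n : Int) : Prop :=
  ∀ x ∈ pvClosure adj_list start_node, x ∈ adj_list.map Prod.fst
instance (start_node : Int) (adj_list : List (Int × List Int)) (n : Int) : Decidable (Pre_dfs start_node adj_list n) := by unfold Pre_dfs; infer_instance

def pvWitness_dfs : Int × (List (Int × List Int)) × Int := (0, [(0, [1]), (1, [0]), (2, [])], 3)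

def Spec_dfs (start_node : Int) (adj_list : List (Int × List Int)) (n : Int) (out : Int) : Prop := out = dfs_alt start_node adj_list n
instance (start_node : Int) (adj_list : List (Int × List Int)) (n : Int) (out : Int) : Decidable (Spec_dfs start_node adj_list n out) := by unfold Spec_dfs; infer_instance

-- ===== CLAIM (what is proved, stated in full; the proofs are below) =====
def Claim_equal_dfs : Prop := ∀ (start_node : Int) (adj_list : List (Int × List Int)) (n : Int), Dom_dfs start_node adj_list n → Pre_dfs start_node adj_list n → Spec_dfs start_node adj_list n (dfs start_node adj_list n)

-- ===== LEMMAS AND PROOFS =====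

-- reachability along adjacency-list edges
def pvReach (adj : List (Int × List Int)) (s x : Int) : Prop :=
  Relation.ReflTransGen (fun a b => b ∈ pvNb adj a) s x

lemma pv_isSome_get?_mk (adj : List (Int × List Int)) (k : Int) :
    ((PySem.Dict.mk adj).get? k).isSome ↔ k ∈ adj.map Prod.fst := by
  rw [← PySem.Dict.contains_eq_isSome_get?]
  rw [PySem.Dict.contains_iff_mem_keys, PySem.Dict.keys_mk]

lemma pv_get?_mk_mem (adj : List (Int × List Int)) (k : Int) (v : List Int)
    (h : (PySem.Dict.mk adj).get? k = some v) : (k, v) ∈ adj := by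
  induction adj with
  | nil => simp [PySem.Dict.get?] at h
  | cons p t ih =>
    obtain ⟨a, b⟩ := p
    rw [PySem.Dict.get?_mk_cons] at h
    by_cases hak : a = k
    · subst hak; simp at h; subst h; simp
    · simp [hak] at h
      exact List.mem_cons_of_mem _ (ih h)

lemma pv_nb_of_get? (adj : List (Int × List Int)) (k : Int) (v : List Int)
    (h : (PySem.Dict.mk adj).get? k = some v) : pvNb adj k = v := by
  rw [pvNb, PySem.Dict.getD_eq_get?_getD, h]; rfl

-- defining equation of A's loop in if/match form
lemma dfsLoop_succ_cons (adj : List (Int × List Int)) (f : Nat) (v : PySem.Set Int)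
    (c : Int) (rest : List Int) :
    dfsLoop adj (f + 1) v (c :: rest) =
      if PySem.Set.contains v c then dfsLoop adj f v rest
      else match (PySem.Dict.mk adj).get? c with
        | none => PySem.Set.add v c
        | some ds => dfsLoop adj f (PySem.Set.add v c)
            (ds.foldl (fun st d => if PySem.Set.contains (PySem.Set.add v c) d then st else d :: st) rest) := rfl

-- ---- generic facts about A's push loop ----
lemma pvA_push_mem {p : Int → Bool} (ds : List Int) (rest : List Int) (x : Int)
    (hx : x ∈ ds.foldl (fun st d => if p d then st else d :: st) rest) :
    x ∈ ds ∨ x ∈ rest := by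
  induction ds generalizing rest with
  | nil => exact Or.inr hx
  | cons d t ih =>
    simp only [List.foldl_cons] at hx
    rcases ih _ hx with h | h
    · exact Or.inl (List.mem_cons_of_mem _ h)
    · by_cases hp : p d
      · simp [hp] at h; exact Or.inr h
      · simp [hp] at h
        rcases h with h | h
        · exact Or.inl (by simp [h])
        · exact Or.inr h

lemma pvA_push_rest_sub {p : Int → Bool} (ds : List Int) (rest : List Int) (x : Int)
    (hx : x ∈ rest) : x ∈ ds.foldl (fun st d => if p d then st else d :: st) rest := by
  induction ds generalizing rest with
  | nil => exact hx
  | cons d t ih =>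
    simp only [List.foldl_cons]
    by_cases hp : p d
    · simp [hp]; exact ih _ hx
    · simp [hp]; exact ih _ (List.mem_cons_of_mem _ hx)

lemma pvA_push_of_mem {p : Int → Bool} (ds : List Int) (rest : List Int) (d : Int)
    (hd : d ∈ ds) (hp : p d = false) :
    d ∈ ds.foldl (fun st d => if p d then st else d :: st) rest := by
  induction ds generalizing rest with
  | nil => simp at hd
  | cons a t ih =>
    simp only [List.foldl_cons]
    rcases List.mem_cons.1 hd with h | h
    · subst h; simp [hp]
      exact pvA_push_rest_sub _ _ _ (by simp)
    · by_cases hpa : p a <;> simp [hpa] <;> exact ih _ h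

lemma pvA_push_len {p : Int → Bool} (ds : List Int) (rest : List Int) :
    (ds.foldl (fun st d => if p d then st else d :: st) rest).length ≤ ds.length + rest.length := by
  induction ds generalizing rest with
  | nil => simp
  | cons d t ih =>
    simp only [List.foldl_cons]
    by_cases hp : p d
    · simp [hp]; exact le_trans (ih _) (by omega)
    · simp [hp]; exact le_trans (ih _) (by simp; omega)

-- ---- A: monotonicity, nodup, soundness ----
lemma pvA_mono (adj : List (Int × List Int)) :
    ∀ (f : Nat) (v : PySem.Set Int) (st : List Int) (x : Int),
      x ∈ v → x ∈ dfsLoop adj f v st := by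
  intro f
  induction f with
  | zero => intro v st x hx; simpa [dfsLoop] using hx
  | succ f ih =>
    intro v st x hx
    match st with
    | [] => simpa [dfsLoop] using hx
    | c :: rest =>
      rw [dfsLoop_succ_cons]
      split
      · exact ih _ _ _ hx
      · split
        · exact (PySem.Set.mem_add _ _ _).2 (Or.inl hx)
        · exact ih _ _ _ ((PySem.Set.mem_add _ _ _).2 (Or.inl hx))

lemma pvA_nodup (adj : List (Int × List Int)) :
    ∀ (f : Nat) (v : PySem.Set Int) (st : List Int),
      v.Nodup → (dfsLoop adj f v st).Nodup := by
  intro f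
  induction f with
  | zero => intro v st h; simpa [dfsLoop] using h
  | succ f ih =>
    intro v st h
    match st with
    | [] => simpa [dfsLoop] using h
    | c :: rest =>
      rw [dfsLoop_succ_cons]
      split
      · exact ih _ _ h
      · split
        · exact PySem.Set.nodup_add _ _ h
        · exact ih _ _ (PySem.Set.nodup_add _ _ h)

lemma pvA_sound (adj : List (Int × List Int)) (P : Int → Prop)
    (hstep : ∀ a b, P a → b ∈ pvNb adj a → P b) :
    ∀ (f : Nat) (v : PySem.Set Int) (st : List Int),
      (∀ x ∈ v, P x) → (∀ x ∈ st, P x) →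
      ∀ x ∈ dfsLoop adj f v st, P x := by
  intro f
  induction f with
  | zero => intro v st hv hst x hx; exact hv x (by simpa [dfsLoop] using hx)
  | succ f ih =>
    intro v st hv hst x hx
    match st with
    | [] => exact hv x (by simpa [dfsLoop] using hx)
    | c :: rest =>
      rw [dfsLoop_succ_cons] at hx
      have hPc : P c := hst c (by simp)
      have hrest : ∀ y ∈ rest, P y := fun y hy => hst y (List.mem_cons_of_mem _ hy)
      have hv' : ∀ y ∈ PySem.Set.add v c, P y := by
        intro y hy
        rcases (PySem.Set.mem_add _ _ _).1 hy with h | h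
        · exact hv y h
        · exact h ▸ hPc
      split at hx
      · exact ih _ _ hv hrest x hx
      · split at hx
        · exact hv' x hx
        · next ds hg =>
          refine ih _ _ hv' ?_ x hx
          intro y hy
          rcases pvA_push_mem _ _ _ hy with h | h
          · exact hstep c y hPc (by rw [pv_nb_of_get? adj c ds hg]; exact h)
          · exact hrest y h

-- ---- potential functions ----
def pvPhiA (adj : List (Int × List Int)) (v : List Int) : Nat :=
  ((adj.map Prod.fst).map (fun k => if k ∈ v then 0 else (pvNb adj k).length)).sum

lemma pv_phi_aux (g : Int → Nat) (v : PySem.Set Int) (c : Int) (hcv : c ∉ v) :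
    ∀ ks : List Int, c ∈ ks →
      (ks.map (fun k => if k ∈ PySem.Set.add v c then 0 else g k)).sum + g c ≤
        (ks.map (fun k => if k ∈ v then 0 else g k)).sum := by
  intro ks
  induction ks with
  | nil => simp
  | cons k t ih =>
    intro hc
    simp only [List.map_cons, List.sum_cons]
    have hpt : (t.map (fun k => if k ∈ PySem.Set.add v c then 0 else g k)).sum ≤
        (t.map (fun k => if k ∈ v then 0 else g k)).sum := by
      apply List.sum_le_sum
      intro x hx
      by_cases hxv : x ∈ v
      · simp [hxv, (PySem.Set.mem_add _ _ _).2 (Or.inl hxv)]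
      · by_cases hxa : x ∈ PySem.Set.add v c <;> simp [hxv, hxa]
    by_cases hkc : k = c
    · subst hkc
      have h1 : k ∈ PySem.Set.add v k := (PySem.Set.mem_add _ _ _).2 (Or.inr rfl)
      rw [if_pos h1, if_neg hcv]
      omega
    · rcases List.mem_cons.1 hc with h | h
      · exact absurd h.symm (fun he => hkc he)
      · have : (k ∈ PySem.Set.add v c) ↔ (k ∈ v) := by
          rw [PySem.Set.mem_add]
          exact ⟨fun hh => hh.resolve_right (fun he => hkc he), Or.inl⟩
        rw [if_congr this rfl rfl]
        have := ih h
        omega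

lemma pvPhiA_add (adj : List (Int × List Int)) (v : PySem.Set Int) (c : Int)
    (hc : c ∈ adj.map Prod.fst) (hcv : c ∉ v) :
    pvPhiA adj (PySem.Set.add v c) + (pvNb adj c).length ≤ pvPhiA adj v :=
  pv_phi_aux (fun k => (pvNb adj k).length) v c hcv _ hc

def pvPsiB (adj : List (Int × List Int)) (v : List Int) : Nat :=
  ((adj.flatMap (fun p => p.2)).map (fun d => if d ∈ v then 0 else 1)).sum

lemma pvPsiB_le (adj : List (Int × List Int)) (v : List Int) :
    pvPsiB adj v ≤ (adj.map (fun p => p.2.length)).sum := by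
  calc pvPsiB adj v ≤ ((adj.flatMap (fun p => p.2)).map (fun _ => 1)).sum := by
        apply List.sum_le_sum; intro x hx; split <;> simp
    _ = (adj.flatMap (fun p => p.2)).length := by simp
    _ = (adj.map (fun p => p.2.length)).sum := by rw [List.length_flatMap]

lemma pv_psi_aux (v v' : List Int) (d : Int) (hsub : ∀ x ∈ v, x ∈ v')
    (hdv : d ∉ v) (hdv' : d ∈ v') :
    ∀ l : List Int, d ∈ l →
      (l.map (fun x => if x ∈ v' then 0 else 1)).sum < (l.map (fun x => if x ∈ v then 0 else 1)).sum := by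
  intro l
  induction l with
  | nil => simp
  | cons x t ih =>
    intro hd
    simp only [List.map_cons, List.sum_cons]
    have hpt : (t.map (fun x => if x ∈ v' then 0 else 1)).sum ≤
        (t.map (fun x => if x ∈ v then 0 else 1)).sum := by
      apply List.sum_le_sum; intro y hy
      by_cases hyv : y ∈ v
      · simp [hyv, hsub y hyv]
      · by_cases hyv' : y ∈ v' <;> simp [hyv, hyv']
    by_cases hxd : x = d
    · subst hxd; simp [hdv, hdv']; omega
    · rcases List.mem_cons.1 hd with h | h
      · exact absurd h.symm hxd
      · have := ih h
        by_cases hxv : x ∈ v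
        · simp [hxv, hsub x hxv]; omega
        · by_cases hxv' : x ∈ v' <;> simp [hxv, hxv'] <;> omega

lemma pvPsiB_lt (adj : List (Int × List Int)) (v v' : List Int) (d : Int)
    (hsub : ∀ x ∈ v, x ∈ v') (hd : d ∈ adj.flatMap (fun p => p.2))
    (hdv : d ∉ v) (hdv' : d ∈ v') : pvPsiB adj v' < pvPsiB adj v :=
  pv_psi_aux v v' d hsub hdv hdv' _ hd

-- ---- reachability closure: pvClosure reaches its fixpoint and contains all reachable nodes ----
lemma pv_nb_sub_flatMap (adj : List (Int × List Int)) (x y : Int)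
    (hy : y ∈ pvNb adj x) : y ∈ adj.flatMap (fun p => p.2) := by
  rw [pvNb, PySem.Dict.getD_eq_get?_getD] at hy
  cases hg : (PySem.Dict.mk adj).get? x with
  | none => rw [hg] at hy; simp at hy
  | some l =>
    rw [hg] at hy
    exact List.mem_flatMap.2 ⟨(x, l), pv_get?_mk_mem adj x l hg, by simpa using hy⟩

lemma pvExpand_fold (adj : List (Int × List Int)) :
    ∀ (l : List Int) (t : PySem.Set Int),
      (∀ y ∈ t, y ∈ l.foldl (fun t x => PySem.Set.update t (pvNb adj x)) t) ∧
      (∀ y ∈ l.foldl (fun t x => PySem.Set.update t (pvNb adj x)) t,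
        y ∈ t ∨ ∃ x ∈ l, y ∈ pvNb adj x) ∧
      (∀ x ∈ l, ∀ y ∈ pvNb adj x, y ∈ l.foldl (fun t x => PySem.Set.update t (pvNb adj x)) t) ∧
      (t.Nodup → (l.foldl (fun t x => PySem.Set.update t (pvNb adj x)) t).Nodup) ∧
      (t <+: l.foldl (fun t x => PySem.Set.update t (pvNb adj x)) t) := by
  intro l
  induction l with
  | nil =>
    intro t
    exact ⟨fun y hy => hy, fun y hy => Or.inl hy, by simp, fun h => h, List.prefix_refl t⟩
  | cons x xs ih =>
    intro t
    simp only [List.foldl_cons]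
    obtain ⟨c1, c2, c3, c4, c5⟩ := ih (PySem.Set.update t (pvNb adj x))
    refine ⟨?_, ?_, ?_, ?_, ?_⟩
    · intro y hy
      exact c1 y ((PySem.Set.mem_update _ _ _).2 (Or.inl hy))
    · intro y hy
      rcases c2 y hy with h | ⟨z, hz, hyz⟩
      · rcases (PySem.Set.mem_update _ _ _).1 h with h' | h'
        · exact Or.inl h'
        · exact Or.inr ⟨x, by simp, h'⟩
      · exact Or.inr ⟨z, List.mem_cons_of_mem _ hz, hyz⟩
    · intro z hz y hy
      rcases List.mem_cons.1 hz with h | h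
      · exact c1 y ((PySem.Set.mem_update _ _ _).2 (Or.inr (h ▸ hy)))
      · exact c3 z h y hy
    · intro hnd
      exact c4 (PySem.Set.nodup_update _ _ hnd)
    · refine List.IsPrefix.trans ?_ c5
      rw [PySem.Set.update_eq_append_filter]
      exact ⟨_, rfl⟩

lemma pvExpand_sub (adj : List (Int × List Int)) (s : PySem.Set Int) :
    ∀ y ∈ s, y ∈ pvExpand adj s := (pvExpand_fold adj s s).1

lemma pvExpand_mem (adj : List (Int × List Int)) (s : PySem.Set Int) :
    ∀ y ∈ pvExpand adj s, y ∈ s ∨ ∃ x ∈ s, y ∈ pvNb adj x := (pvExpand_fold adj s s).2.1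

lemma pvExpand_nb (adj : List (Int × List Int)) (s : PySem.Set Int) :
    ∀ x ∈ s, ∀ y ∈ pvNb adj x, y ∈ pvExpand adj s := (pvExpand_fold adj s s).2.2.1

lemma pvExpand_nodup (adj : List (Int × List Int)) (s : PySem.Set Int) (h : s.Nodup) :
    (pvExpand adj s).Nodup := (pvExpand_fold adj s s).2.2.2.1 h

lemma pvExpand_new (adj : List (Int × List Int)) (s : PySem.Set Int) (hnd : s.Nodup)
    (hne : pvExpand adj s ≠ s) : ∃ d ∈ pvExpand adj s, d ∉ s := by
  have hpre : s <+: pvExpand adj s := (pvExpand_fold adj s s).2.2.2.2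
  obtain ⟨rest, hrest⟩ := hpre
  cases hr : rest with
  | nil => exact absurd (by rw [← hrest, hr, List.append_nil]) hne
  | cons d tl =>
    have hde : d ∈ pvExpand adj s := by rw [← hrest, hr]; simp
    have hnd2 : (s ++ rest).Nodup := by rw [hrest]; exact pvExpand_nodup adj s hnd
    have hdisj := (List.nodup_append.1 hnd2).2.2
    refine ⟨d, hde, fun hds => ?_⟩
    exact hdisj d hds d (show d ∈ rest by rw [hr]; simp) rfl

-- iteration from the inside
def pvIterN (adj : List (Int × List Int)) : Nat → PySem.Set Int → PySem.Set Int
  | 0, s => s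
  | n + 1, s => pvIterN adj n (pvExpand adj s)

lemma pvIterN_shift (adj : List (Int × List Int)) :
    ∀ (n : Nat) (s : PySem.Set Int), pvIterN adj (n + 1) s = pvExpand adj (pvIterN adj n s) := by
  intro n
  induction n with
  | zero => intro s; rfl
  | succ n ih =>
    intro s
    show pvIterN adj (n + 1) (pvExpand adj s) = _
    rw [ih (pvExpand adj s)]
    rfl

lemma pvClosure_eq (adj : List (Int × List Int)) (start : Int) :
    pvClosure adj start =
      pvIterN adj (1 + (adj.map (fun p => p.2.length)).sum) (PySem.Set.add PySem.Set.empty start) := by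
  rw [pvClosure]
  generalize (1 + (adj.map (fun p => p.2.length)).sum) = n
  induction n with
  | zero => rfl
  | succ n ih =>
    rw [List.range_succ, List.foldl_append, ih, List.foldl_cons, List.foldl_nil, ← pvIterN_shift]

lemma pvIterN_of_fix (adj : List (Int × List Int)) (s : PySem.Set Int)
    (h : pvExpand adj s = s) : ∀ n, pvIterN adj n s = s := by
  intro n
  induction n with
  | zero => rfl
  | succ n ih => rw [pvIterN_shift, ih, h]

lemma pvIterN_fix (adj : List (Int × List Int)) :
    ∀ (n : Nat) (s : PySem.Set Int), s.Nodup → pvPsiB adj s < n →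
      pvExpand adj (pvIterN adj n s) = pvIterN adj n s ∧
      (pvIterN adj n s).Nodup ∧
      (∀ y ∈ s, y ∈ pvIterN adj n s) := by
  intro n
  induction n with
  | zero => intro s _ h; exact absurd h (by omega)
  | succ n ih =>
    intro s hnd hψ
    by_cases hfix : pvExpand adj s = s
    · rw [show pvIterN adj (n + 1) s = pvIterN adj n (pvExpand adj s) from rfl, hfix,
        pvIterN_of_fix adj s hfix n]
      exact ⟨hfix, hnd, fun y hy => hy⟩
    · obtain ⟨d, hde, hds⟩ := pvExpand_new adj s hnd hfix
      have hdf : d ∈ adj.flatMap (fun p => p.2) := by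
        rcases pvExpand_mem adj s d hde with h | ⟨x, _, hx⟩
        · exact absurd h hds
        · exact pv_nb_sub_flatMap adj x d hx
      have hψ' : pvPsiB adj (pvExpand adj s) < n := by
        have := pvPsiB_lt adj s (pvExpand adj s) d (pvExpand_sub adj s) hdf hds hde
        omega
      obtain ⟨h1, h2, h3⟩ := ih (pvExpand adj s) (pvExpand_nodup adj s hnd) hψ'
      exact ⟨h1, h2, fun y hy => h3 y (pvExpand_sub adj s y hy)⟩

lemma pvClosure_start (adj : List (Int × List Int)) (start : Int) :
    start ∈ pvClosure adj start := by
  rw [pvClosure_eq]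
  have hψ : pvPsiB adj (PySem.Set.add PySem.Set.empty start) <
      1 + (adj.map (fun p => p.2.length)).sum := by
    have := pvPsiB_le adj (PySem.Set.add PySem.Set.empty start)
    omega
  obtain ⟨_, _, h3⟩ := pvIterN_fix adj _ (PySem.Set.add PySem.Set.empty start)
    (PySem.Set.nodup_add _ _ (by simp [PySem.Set.empty])) hψ
  exact h3 start ((PySem.Set.mem_add _ _ _).2 (Or.inr rfl))

lemma pvClosure_closed (adj : List (Int × List Int)) (start : Int) :
    ∀ x ∈ pvClosure adj start, ∀ y ∈ pvNb adj x, y ∈ pvClosure adj start := by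
  have hψ : pvPsiB adj (PySem.Set.add PySem.Set.empty start) <
      1 + (adj.map (fun p => p.2.length)).sum := by
    have := pvPsiB_le adj (PySem.Set.add PySem.Set.empty start)
    omega
  obtain ⟨h1, _, _⟩ := pvIterN_fix adj _ (PySem.Set.add PySem.Set.empty start)
    (PySem.Set.nodup_add _ _ (by simp [PySem.Set.empty])) hψ
  intro x hx y hy
  rw [pvClosure_eq] at hx ⊢
  rw [← h1]
  exact pvExpand_nb adj _ x hx y hy

-- ---- A: main invariant (fuel sufficiency + closedness of the result) ----
lemma pvA_main (adj : List (Int × List Int)) (Q : Int → Prop)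
    (HQstep : ∀ a b, Q a → b ∈ pvNb adj a → Q b)
    (HQkey : ∀ x, Q x → ((PySem.Dict.mk adj).get? x).isSome) :
    ∀ (f : Nat) (v : PySem.Set Int) (st : List Int),
      (∀ x ∈ st, Q x) →
      pvPhiA adj v + st.length < f →
      (∀ x ∈ st, x ∈ dfsLoop adj f v st) ∧
      (∀ x ∈ dfsLoop adj f v st, x ∉ v →
        ∀ d ∈ pvNb adj x, d ∈ dfsLoop adj f v st) := by
  intro f
  induction f with
  | zero => intro v st hst hf; exact absurd hf (by omega)
  | succ f ih =>
    intro v st hst hf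
    match st with
    | [] =>
      refine ⟨by simp, ?_⟩
      intro x hx hxv
      exact absurd (by simpa [dfsLoop] using hx) hxv
    | c :: rest =>
      rw [dfsLoop_succ_cons]
      have hrestk : ∀ x ∈ rest, Q x :=
        fun x hx => hst x (List.mem_cons_of_mem _ hx)
      by_cases hc : PySem.Set.contains v c
      · rw [if_pos hc]
        have hcv : c ∈ v := (PySem.Set.contains_iff _ _).1 hc
        have hf' : pvPhiA adj v + rest.length < f := by
          simp only [List.length_cons] at hf; omega
        obtain ⟨h1, h2⟩ := ih v rest hrestk hf'
        refine ⟨?_, h2⟩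
        intro x hx
        rcases List.mem_cons.1 hx with h | h
        · exact h ▸ pvA_mono adj f v rest c hcv
        · exact h1 x h
      · rw [if_neg hc]
        have hcv : c ∉ v := fun h => hc ((PySem.Set.contains_iff _ _).2 h)
        have hQc : Q c := hst c (by simp)
        cases hg : (PySem.Dict.mk adj).get? c with
        | none =>
          exact absurd (HQkey c hQc) (by simp [hg])
        | some ds =>
          have hkey : c ∈ adj.map Prod.fst :=
            (pv_isSome_get?_mk adj c).1 (by simp [hg])
          have hnb : pvNb adj c = ds := pv_nb_of_get? adj c ds hg
          set v' := PySem.Set.add v c with hv'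
          set st' := ds.foldl (fun st d => if PySem.Set.contains v' d then st else d :: st) rest with hst'
          have hstk' : ∀ x ∈ st', Q x := by
            intro x hx
            rcases pvA_push_mem _ _ _ hx with h | h
            · exact HQstep c x hQc (hnb ▸ h)
            · exact hrestk x h
          have hf' : pvPhiA adj v' + st'.length < f := by
            have h1 := pvPhiA_add adj v c hkey hcv
            have h2 := pvA_push_len (p := fun d => PySem.Set.contains v' d) ds rest
            rw [hnb] at h1
            rw [← hv'] at h1
            rw [← hst'] at h2
            simp only [List.length_cons] at hf
            omega
          obtain ⟨h1, h2⟩ := ih v' st' hstk' hf'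
          have hres_c : c ∈ dfsLoop adj f v' st' :=
            pvA_mono adj f v' st' c ((PySem.Set.mem_add _ _ _).2 (Or.inr rfl))
          have hrest_res : ∀ x ∈ rest, x ∈ dfsLoop adj f v' st' := by
            intro x hx
            exact h1 x (pvA_push_rest_sub _ _ _ hx)
          refine ⟨?_, ?_⟩
          · intro x hx
            rcases List.mem_cons.1 hx with h | h
            · exact h ▸ hres_c
            · exact hrest_res x h
          · intro x hx hxv
            by_cases hxc : x = c
            · subst hxc
              rw [hnb]
              intro d hd
              by_cases hdv' : PySem.Set.contains v' d
              · exact pvA_mono adj f v' st' d ((PySem.Set.contains_iff _ _).1 hdv')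
              · exact h1 d (pvA_push_of_mem _ _ _ hd (Bool.not_eq_true _ ▸ (by simpa using hdv')))
            · have hxv' : x ∉ v' := by
                rw [hv', PySem.Set.mem_add]
                rintro (h | h)
                · exact hxv h
                · exact hxc h
              exact h2 x hx hxv'

-- ---- B: round invariants ----
lemma pvB_inner (v0 : PySem.Set Int) :
    ∀ (ds : List Int) (acc r : PySem.Set Int × List Int),
      r = ds.foldl (fun acc d => if PySem.Set.contains acc.1 d then acc
          else (PySem.Set.add acc.1 d, acc.2 ++ [d])) acc →
      (∀ y ∈ v0, y ∈ acc.1) → (∀ y ∈ acc.2, y ∈ acc.1) →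
      (∀ y ∈ acc.1, y ∈ r.1) ∧
      (∀ y ∈ acc.2, y ∈ r.2) ∧
      (∀ y ∈ r.1, y ∈ acc.1 ∨ y ∈ r.2) ∧
      (∀ y ∈ r.2, y ∈ r.1) ∧
      (∀ y ∈ r.2, y ∈ acc.2 ∨ (y ∉ v0 ∧ y ∈ ds)) ∧
      (∀ d ∈ ds, d ∈ r.1) ∧
      (∀ y ∈ r.1, y ∈ acc.1 ∨ y ∈ ds) ∧
      (acc.1.Nodup → r.1.Nodup) := by
  intro ds
  induction ds with
  | nil =>
    intro acc r hr h0 h2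
    subst hr
    exact ⟨fun y hy => hy, fun y hy => hy, fun y hy => Or.inl hy, h2,
      fun y hy => Or.inl hy, by simp, fun y hy => Or.inl hy, fun h => h⟩
  | cons d t ih =>
    intro acc r hr h0 h2
    simp only [List.foldl_cons] at hr
    by_cases hd : PySem.Set.contains acc.1 d
    · rw [if_pos hd] at hr
      have hdm : d ∈ acc.1 := (PySem.Set.contains_iff _ _).1 hd
      obtain ⟨c1, c8, c2, c3, c4, c5, c6, c7⟩ := ih acc r hr h0 h2
      refine ⟨c1, c8, c2, c3, ?_, ?_, ?_, c7⟩
      · intro y hy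
        rcases c4 y hy with h | h
        · exact Or.inl h
        · exact Or.inr ⟨h.1, List.mem_cons_of_mem _ h.2⟩
      · intro e he
        rcases List.mem_cons.1 he with h | h
        · exact h ▸ c1 d hdm
        · exact c5 e h
      · intro y hy
        rcases c6 y hy with h | h
        · exact Or.inl h
        · exact Or.inr (List.mem_cons_of_mem _ h)
    · rw [if_neg hd] at hr
      have hdm : d ∉ acc.1 := fun h => hd ((PySem.Set.contains_iff _ _).2 h)
      have h0' : ∀ y ∈ v0, y ∈ (PySem.Set.add acc.1 d, acc.2 ++ [d]).1 := fun y hy =>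
        (PySem.Set.mem_add _ _ _).2 (Or.inl (h0 y hy))
      have h2' : ∀ y ∈ (PySem.Set.add acc.1 d, acc.2 ++ [d]).2,
          y ∈ (PySem.Set.add acc.1 d, acc.2 ++ [d]).1 := by
        intro y hy
        rcases List.mem_append.1 hy with h | h
        · exact (PySem.Set.mem_add _ _ _).2 (Or.inl (h2 y h))
        · exact (PySem.Set.mem_add _ _ _).2 (Or.inr (by simpa using h))
      obtain ⟨c1, c8, c2, c3, c4, c5, c6, c7⟩ := ih _ r hr h0' h2'
      have hacc2 : ∀ y ∈ acc.2, y ∈ r.2 := fun y hy =>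
        c8 y (List.mem_append.2 (Or.inl hy))
      have hdr2 : d ∈ r.2 := c8 d (List.mem_append.2 (Or.inr (by simp)))
      refine ⟨?_, hacc2, ?_, c3, ?_, ?_, ?_, ?_⟩
      · intro y hy
        exact c1 y ((PySem.Set.mem_add _ _ _).2 (Or.inl hy))
      · intro y hy
        rcases c2 y hy with h | h
        · rcases (PySem.Set.mem_add _ _ _).1 h with h' | h'
          · exact Or.inl h'
          · exact Or.inr (h' ▸ hdr2)
        · exact Or.inr h
      · intro y hy
        rcases c4 y hy with h | h
        · rcases List.mem_append.1 h with h' | h'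
          · exact Or.inl h'
          · simp at h'
            subst h'
            exact Or.inr ⟨fun hv => hdm (h0 y hv), by simp⟩
        · exact Or.inr ⟨h.1, List.mem_cons_of_mem _ h.2⟩
      · intro e he
        rcases List.mem_cons.1 he with h | h
        · exact h ▸ c1 d ((PySem.Set.mem_add _ _ _).2 (Or.inr rfl))
        · exact c5 e h
      · intro y hy
        rcases c6 y hy with h | h
        · rcases (PySem.Set.mem_add _ _ _).1 h with h' | h'
          · exact Or.inl h'
          · exact Or.inr (h' ▸ by simp)
        · exact Or.inr (List.mem_cons_of_mem _ h)
      · intro hnd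
        exact c7 (PySem.Set.nodup_add _ _ hnd)

lemma pvB_round_inv (adj : List (Int × List Int)) (v0 : PySem.Set Int) :
    ∀ (frontier : List Int) (acc r : PySem.Set Int × List Int),
      r = bfsRound adj frontier acc →
      (∀ y ∈ v0, y ∈ acc.1) → (∀ y ∈ acc.2, y ∈ acc.1) →
      (∀ y ∈ acc.1, y ∈ r.1) ∧
      (∀ y ∈ acc.2, y ∈ r.2) ∧
      (∀ y ∈ r.1, y ∈ acc.1 ∨ y ∈ r.2) ∧
      (∀ y ∈ r.2, y ∈ r.1) ∧
      (∀ y ∈ r.2, y ∈ acc.2 ∨ (y ∉ v0 ∧ y ∈ adj.flatMap (fun p => p.2))) ∧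
      (∀ x ∈ frontier, ∀ d ∈ pvNb adj x, d ∈ r.1) ∧
      (∀ y ∈ r.1, y ∈ acc.1 ∨ ∃ x ∈ frontier, y ∈ pvNb adj x) ∧
      (acc.1.Nodup → r.1.Nodup) := by
  intro frontier
  induction frontier with
  | nil =>
    intro acc r hr h0 h2
    rw [bfsRound, List.foldl_nil] at hr
    subst hr
    exact ⟨fun y hy => hy, fun y hy => hy, fun y hy => Or.inl hy, h2,
      fun y hy => Or.inl hy, by simp, fun y hy => Or.inl hy, fun h => h⟩
  | cons x fr ih =>
    intro acc r hr h0 h2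
    rw [bfsRound, List.foldl_cons] at hr
    cases hg : (PySem.Dict.mk adj).get? x with
    | none =>
      rw [hg] at hr
      have hnb : pvNb adj x = [] := by
        rw [pvNb, PySem.Dict.getD_eq_get?_getD, hg]; rfl
      obtain ⟨o1, o8, o2, o3, o4, o5, o6, o7⟩ := ih acc r hr h0 h2
      refine ⟨o1, o8, o2, o3, o4, ?_, ?_, o7⟩
      · intro z hz
        rcases List.mem_cons.1 hz with h | h
        · rw [h, hnb]; simp
        · exact o5 z h
      · intro y hy
        rcases o6 y hy with h | h
        · exact Or.inl h
        · obtain ⟨z, hz, hyz⟩ := h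
          exact Or.inr ⟨z, List.mem_cons_of_mem _ hz, hyz⟩
    | some ds =>
      rw [hg] at hr
      have hnb : pvNb adj x = ds := pv_nb_of_get? adj x ds hg
      have hdsf : ∀ d ∈ ds, d ∈ adj.flatMap (fun p => p.2) := by
        intro d hd
        exact List.mem_flatMap.2 ⟨(x, ds), pv_get?_mk_mem adj x ds hg, hd⟩
      obtain ⟨i1, i8, i2, i3, i4, i5, i6, i7⟩ :=
        pvB_inner v0 ds acc _ rfl h0 h2
      set acc' := ds.foldl (fun acc d => if PySem.Set.contains acc.1 d then acc
          else (PySem.Set.add acc.1 d, acc.2 ++ [d])) acc with hacc'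
      have h0' : ∀ y ∈ v0, y ∈ acc'.1 := fun y hy => i1 y (h0 y hy)
      obtain ⟨o1, o8, o2, o3, o4, o5, o6, o7⟩ := ih acc' r hr h0' i3
      refine ⟨?_, ?_, ?_, o3, ?_, ?_, ?_, fun h => o7 (i7 h)⟩
      · intro y hy; exact o1 y (i1 y hy)
      · intro y hy; exact o8 y (i8 y hy)
      · intro y hy
        rcases o2 y hy with h | h
        · rcases i2 y h with h' | h'
          · exact Or.inl h'
          · exact Or.inr (o8 y h')
        · exact Or.inr h
      · intro y hy
        rcases o4 y hy with h | h
        · rcases i4 y h with h' | h'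
          · exact Or.inl h'
          · exact Or.inr ⟨h'.1, hdsf y h'.2⟩
        · exact Or.inr h
      · intro z hz
        rcases List.mem_cons.1 hz with h | h
        · subst h
          rw [hnb]
          intro d hd
          exact o1 d (i5 d hd)
        · exact o5 z h
      · intro y hy
        rcases o6 y hy with h | h
        · rcases i6 y h with h' | h'
          · exact Or.inl h'
          · exact Or.inr ⟨x, by simp, hnb ▸ h'⟩
        · obtain ⟨z, hz, hyz⟩ := h
          exact Or.inr ⟨z, List.mem_cons_of_mem _ hz, hyz⟩

-- defining equation of B's loop
lemma bfsLoop_succ (adj : List (Int × List Int)) (f : Nat) (v : PySem.Set Int)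
    (frontier : List Int) :
    bfsLoop adj (f + 1) v frontier =
      if frontier.isEmpty then v
      else bfsLoop adj f (bfsRound adj frontier (v, [])).1 (bfsRound adj frontier (v, [])).2 := rfl

lemma pvB_nodup (adj : List (Int × List Int)) :
    ∀ (f : Nat) (v : PySem.Set Int) (frontier : List Int),
      v.Nodup → (bfsLoop adj f v frontier).Nodup := by
  intro f
  induction f with
  | zero => intro v fr h; exact h
  | succ f ih =>
    intro v fr h
    rw [bfsLoop_succ]
    by_cases he : fr.isEmpty
    · rw [if_pos he]; exact h
    · rw [if_neg he]
      obtain ⟨_, _, _, _, _, _, _, o7⟩ :=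
        pvB_round_inv adj v fr (v, []) _ rfl (fun y hy => hy) (by simp)
      exact ih _ _ (o7 h)

lemma pvB_sound (adj : List (Int × List Int)) (P : Int → Prop)
    (hstep : ∀ a b, P a → b ∈ pvNb adj a → P b) :
    ∀ (f : Nat) (v : PySem.Set Int) (frontier : List Int),
      (∀ x ∈ v, P x) → (∀ x ∈ frontier, P x) →
      ∀ x ∈ bfsLoop adj f v frontier, P x := by
  intro f
  induction f with
  | zero => intro v fr hv hfr x hx; exact hv x hx
  | succ f ih =>
    intro v fr hv hfr x hx
    rw [bfsLoop_succ] at hx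
    by_cases he : fr.isEmpty
    · rw [if_pos he] at hx; exact hv x hx
    · rw [if_neg he] at hx
      obtain ⟨o1, _, _, o3, _, _, o6, _⟩ :=
        pvB_round_inv adj v fr (v, []) _ rfl (fun y hy => hy) (by simp)
      have hv' : ∀ y ∈ (bfsRound adj fr (v, [])).1, P y := by
        intro y hy
        rcases o6 y hy with h | ⟨z, hz, hyz⟩
        · exact hv y h
        · exact hstep z y (hfr z hz) hyz
      exact ih _ _ hv' (fun y hy => hv' y (o3 y hy)) x hx

lemma pvB_main (adj : List (Int × List Int)) :
    ∀ (f : Nat) (v : PySem.Set Int) (frontier : List Int),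
      (∀ x ∈ frontier, x ∈ v) →
      (∀ x ∈ v, x ∉ frontier → ∀ d ∈ pvNb adj x, d ∈ v) →
      (frontier = [] ∨ pvPsiB adj v + 1 < f) →
      (∀ x ∈ v, x ∈ bfsLoop adj f v frontier) ∧
      (∀ x ∈ bfsLoop adj f v frontier, ∀ d ∈ pvNb adj x, d ∈ bfsLoop adj f v frontier) := by
  intro f
  induction f with
  | zero =>
    intro v fr hsub hclosed hfuel
    have hfr : fr = [] := by
      rcases hfuel with h | h
      · exact h
      · omega
    subst hfr
    exact ⟨fun x hx => hx, fun x hx d hd => hclosed x hx (by simp) d hd⟩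
  | succ f ih =>
    intro v fr hsub hclosed hfuel
    rw [bfsLoop_succ]
    by_cases he : fr.isEmpty
    · rw [if_pos he]
      have hfr : fr = [] := List.isEmpty_iff.1 he
      subst hfr
      exact ⟨fun x hx => hx, fun x hx d hd => hclosed x hx (by simp) d hd⟩
    · rw [if_neg he]
      have hψ : pvPsiB adj v + 1 < f + 1 := by
        rcases hfuel with h | h
        · exact absurd h (by simpa [List.isEmpty_iff] using he)
        · exact h
      obtain ⟨o1, _, o2, o3, o4, o5, _, _⟩ :=
        pvB_round_inv adj v fr (v, []) _ rfl (fun y hy => hy) (by simp)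
      set r := bfsRound adj fr (v, []) with hrdef
      have hsub' : ∀ x ∈ r.2, x ∈ r.1 := o3
      have hclosed' : ∀ x ∈ r.1, x ∉ r.2 → ∀ d ∈ pvNb adj x, d ∈ r.1 := by
        intro x hx hxr2 d hd
        have hxv : x ∈ v := by
          rcases o2 x hx with h | h
          · exact h
          · exact absurd h hxr2
        by_cases hxf : x ∈ fr
        · exact o5 x hxf d hd
        · exact o1 d (hclosed x hxv hxf d hd)
      have hfuel' : r.2 = [] ∨ pvPsiB adj r.1 + 1 < f := by
        cases hr2 : r.2 with
        | nil => exact Or.inl rfl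
        | cons d t =>
          have hd : d ∈ r.2 := by rw [hr2]; simp
          rcases o4 d hd with h | ⟨hdv, hdf⟩
          · simp at h
          · have hlt := pvPsiB_lt adj v r.1 d o1 hdf hdv (o3 d hd)
            omega
      obtain ⟨h1, h2⟩ := ih r.1 r.2 hsub' hclosed' hfuel'
      exact ⟨fun x hx => h1 x (o1 x hx), h2⟩

-- ---- characterisations: both visited sets are exactly the reachable nodes ----
lemma pvA_char (start : Int) (adj : List (Int × List Int))
    (HK : ∀ x, pvReach adj start x → ((PySem.Dict.mk adj).get? x).isSome) :
    ∀ x, x ∈ dfsLoop adj (pvFuelA adj) PySem.Set.empty [start] ↔ pvReach adj start x := by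
  have hstep : ∀ a b, pvReach adj start a → b ∈ pvNb adj a → pvReach adj start b :=
    fun a b ha hb => Relation.ReflTransGen.tail ha hb
  have hphi : pvPhiA adj PySem.Set.empty =
      ((adj.map Prod.fst).map (fun k => (pvNb adj k).length)).sum := by
    unfold pvPhiA
    simp [PySem.Set.empty]
  have hfuel : pvPhiA adj PySem.Set.empty + ([start] : List Int).length < pvFuelA adj := by
    rw [hphi]
    unfold pvFuelA
    simp only [List.length_cons, List.length_nil]
    omega
  obtain ⟨h1, h2⟩ := pvA_main adj (pvReach adj start) hstep HK (pvFuelA adj) PySem.Set.empty [start]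
    (by intro x hx; simp at hx; rw [hx]; exact Relation.ReflTransGen.refl) hfuel
  intro x
  constructor
  · intro hx
    exact pvA_sound adj (pvReach adj start) hstep (pvFuelA adj) PySem.Set.empty [start]
      (by intro y hy; simp [PySem.Set.empty] at hy)
      (by intro y hy; simp at hy; rw [hy]; exact Relation.ReflTransGen.refl) x hx
  · intro hx
    induction hx with
    | refl => exact h1 start (by simp)
    | tail hab hb ih =>
      exact h2 _ ih (by simp [PySem.Set.empty]) _ hb

lemma pvB_char (start : Int) (adj : List (Int × List Int)) :
    ∀ x, x ∈ bfsLoop adj (pvFuelB adj) (PySem.Set.add PySem.Set.empty start) [start] ↔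
      pvReach adj start x := by
  have hstep : ∀ a b, pvReach adj start a → b ∈ pvNb adj a → pvReach adj start b :=
    fun a b ha hb => Relation.ReflTransGen.tail ha hb
  have hv0 : ∀ y ∈ PySem.Set.add PySem.Set.empty start, y = start := by
    intro y hy
    rcases (PySem.Set.mem_add _ _ _).1 hy with h | h
    · simp [PySem.Set.empty] at h
    · exact h
  have hfuel : ([start] : List Int) = [] ∨
      pvPsiB adj (PySem.Set.add PySem.Set.empty start) + 1 < pvFuelB adj := by
    refine Or.inr ?_
    have := pvPsiB_le adj (PySem.Set.add PySem.Set.empty start)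
    rw [pvFuelB]
    omega
  obtain ⟨h1, h2⟩ := pvB_main adj (pvFuelB adj) (PySem.Set.add PySem.Set.empty start) [start]
    (by intro x hx; simp at hx; rw [hx]; exact (PySem.Set.mem_add _ _ _).2 (Or.inr rfl))
    (by intro x hx hxf; exact absurd (by simp [hv0 x hx]) hxf)
    hfuel
  intro x
  constructor
  · intro hx
    exact pvB_sound adj (pvReach adj start) hstep (pvFuelB adj) _ [start]
      (by intro y hy; rw [hv0 y hy]; exact Relation.ReflTransGen.refl)
      (by intro y hy; simp at hy; rw [hy]; exact Relation.ReflTransGen.refl) x hx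
  · intro hx
    induction hx with
    | refl => exact h1 start ((PySem.Set.mem_add _ _ _).2 (Or.inr rfl))
    | tail hab hb ih => exact h2 _ ih _ hb

-- ===== VERDICT (by name: the statement is the Claim_ definition above) =====
theorem dfs_spec : Claim_equal_dfs := by
  intro start adj n _hDom hPre
  show dfs start adj n = dfs_alt start adj n
  have hreach_clo : ∀ x, pvReach adj start x → x ∈ pvClosure adj start := by
    intro x hx
    induction hx with
    | refl => exact pvClosure_start adj start
    | tail hab hb ih => exact pvClosure_closed adj start _ ih _ hb
  have HK : ∀ x, pvReach adj start x → ((PySem.Dict.mk adj).get? x).isSome := by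
    intro x hx
    exact (pv_isSome_get?_mk adj x).2 (hPre x (hreach_clo x hx))
  have hA := pvA_char start adj HK
  have hB := pvB_char start adj
  have hnA : (dfsLoop adj (pvFuelA adj) PySem.Set.empty [start]).Nodup :=
    pvA_nodup adj _ _ _ (by simp [PySem.Set.empty])
  have hnB : (bfsLoop adj (pvFuelB adj) (PySem.Set.add PySem.Set.empty start) [start]).Nodup :=
    pvB_nodup adj _ _ _ (PySem.Set.nodup_add _ _ (by simp [PySem.Set.empty]))
  have hperm : (dfsLoop adj (pvFuelA adj) PySem.Set.empty [start]).Perm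
      (bfsLoop adj (pvFuelB adj) (PySem.Set.add PySem.Set.empty start) [start]) :=
    (List.perm_ext_iff_of_nodup hnA hnB).2 (fun a => (hA a).trans (hB a).symm)
  show |((dfsLoop adj (pvFuelA adj) PySem.Set.empty [start]).length : Int) * 2 - n| =
    |((bfsLoop adj (pvFuelB adj) (PySem.Set.add PySem.Set.empty start) [start]).length : Int) * 2 - n|
  rw [hperm.length_eq]
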